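-- pv_equiv track=rewrite | github.com/kellis-sl/AoC-25 | day3/day3.py | find_largest_pair
-- ===== SOURCE A (Python) =====
-- def find_largest_pair(number, index=0, max_pair="00"):
--     length = len(number)
--
--     if index >= length - 1:
--         return max_pair
--
--     for j in range(index + 1, length):
--         pair = number[index] + number[j]
--         if pair > max_pair:
--             max_pair = pair
--
--     return find_largest_pair(number, index + 1, max_pair)
-- ===== SOURCE B (Python) =====
-- def find_largest_pair(number, index=0, max_pair="00"):
--     # One left-to-right pass: keep the largest character seen so far ("first");
--     # the best pair ending at position j is first + number[j].
--     best = max_pair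
--     first = ""
--     for ch in number[index:]:
--         if first:
--             pair = first + ch
--             if pair > best:
--                 best = pair
--         if ch > first:
--             first = ch
--     return best
-- ===== Notes on version B (the rewrite author's own statement) =====
-- stated objective: faster
-- what changed: Replaces the quadratic recursion that compares every pair number[i]+number[j] (i<j) with a single left-to-right pass keeping the running maximum character, since the best pair ending at j is (max earlier char)+number[j].
-- outside the precondition, e.g. on find_largest_pair('ba', -2, '00'): A returns 'bb', B returns 'ba'; on find_largest_pair('ab', -5, '00'): A raises IndexError, B returns 'ab'
-- crash fix: For index < -len(number) (and index < len(number)-1) A raises IndexError on number[index], while B's slice number[index:] clamps and B returns the best pair of the whole string. — e.g. on find_largest_pair("ab", -5, "00"): A raises IndexError, B returns "ab"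
import Mathlib
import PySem

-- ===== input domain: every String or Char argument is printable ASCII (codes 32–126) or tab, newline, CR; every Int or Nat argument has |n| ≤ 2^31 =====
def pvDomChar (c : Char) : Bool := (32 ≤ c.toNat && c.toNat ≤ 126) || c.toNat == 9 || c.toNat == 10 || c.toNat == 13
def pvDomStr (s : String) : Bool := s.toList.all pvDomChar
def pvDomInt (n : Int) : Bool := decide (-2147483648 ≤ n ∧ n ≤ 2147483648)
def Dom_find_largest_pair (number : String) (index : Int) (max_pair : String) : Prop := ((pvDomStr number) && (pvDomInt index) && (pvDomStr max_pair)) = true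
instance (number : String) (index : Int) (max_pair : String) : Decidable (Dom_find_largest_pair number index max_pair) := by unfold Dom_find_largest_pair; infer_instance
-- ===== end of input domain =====

-- B replaces A's quadratic recursion over all pairs i<j by one linear pass keeping the
-- running maximum character (objective: faster, asymptotically).

-- ===== PORT A =====
-- literal port of A's recursion; the inner `for j in range(index+1, len)` is the foldl
-- over pyRange, `pair > max_pair` is the lexicographic `<` on List Char (= Python's string order)
def find_largest_pair_go (chars : List Char) (index : Int) (max_pair : List Char) : List Char :=
  if (PySem.List.len chars) - 1 ≤ index then max_pair
  else
    let mp := (PySem.List.pyRange (index + 1) (PySem.List.len chars) 1).foldl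
      (fun mp j =>
        if mp < [PySem.List.pyGetD chars index ' ', PySem.List.pyGetD chars j ' ']
        then [PySem.List.pyGetD chars index ' ', PySem.List.pyGetD chars j ' ']
        else mp) max_pair
    find_largest_pair_go chars (index + 1) mp
termination_by ((PySem.List.len chars) - index).toNat
decreasing_by simp only [PySem.List.len] at *; omega

def find_largest_pair (number : String) (index : Int) (max_pair : String) : String :=
  String.ofList (find_largest_pair_go number.toList index max_pair.toList)

-- ===== PORT B =====
-- literal port of Source B: state = (best, first); `first` is "" or a single character
def flpStep (st : List Char × List Char) (ch : Char) : List Char × List Char :=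
  let best := if st.2 ≠ [] then (if st.1 < st.2 ++ [ch] then st.2 ++ [ch] else st.1) else st.1
  let first := if st.2 < [ch] then [ch] else st.2
  (best, first)

def find_largest_pair_alt (number : String) (index : Int) (max_pair : String) : String :=
  String.ofList ((PySem.List.slice number.toList (some index) none).foldl flpStep
    (max_pair.toList, [])).1

-- ===== PRECONDITION & SPEC =====
-- Pre_ excludes negative index: outside the recursion parameter's natural domain (A is
-- meant to be called with index = 0); there A either wraps around — pairing a character
-- with itself and with earlier characters — or raises IndexError for index < -len(number).
def Pre_find_largest_pair (number : String) (index : Int) (max_pair : String) : Prop := 0 ≤ index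
instance (number : String) (index : Int) (max_pair : String) : Decidable (Pre_find_largest_pair number index max_pair) := by unfold Pre_find_largest_pair; infer_instance
def pvWitness_find_largest_pair : String × Int × String := ("935972", 0, "00")

-- For index < -len(number) (and index < len(number)-1) A raises IndexError on
-- number[index], while B's slice number[index:] clamps and B returns the best pair of the
-- whole string.
def Raises_find_largest_pair (number : String) (index : Int) (max_pair : String) : Prop :=
  index < -(PySem.Str.len number) ∧ index < PySem.Str.len number - 1
instance (number : String) (index : Int) (max_pair : String) : Decidable (Raises_find_largest_pair number index max_pair) := by unfold Raises_find_largest_pair; infer_instance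
def pvRaiseWitness_find_largest_pair : String × Int × String := ("ab", -5, "00")
def pvRaiseWitnessOut_find_largest_pair : String := "ab"

def Spec_find_largest_pair (number : String) (index : Int) (max_pair : String) (out : String) : Prop := out = find_largest_pair_alt number index max_pair
instance (number : String) (index : Int) (max_pair : String) (out : String) : Decidable (Spec_find_largest_pair number index max_pair out) := by unfold Spec_find_largest_pair; infer_instance

-- ===== CLAIM (what is proved, stated in full; the proofs are below) =====
def Claim_equal_find_largest_pair : Prop := ∀ (number : String) (index : Int) (max_pair : String), Dom_find_largest_pair number index max_pair → Pre_find_largest_pair number index max_pair → Spec_find_largest_pair number index max_pair (find_largest_pair number index max_pair)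
def Claim_raises_find_largest_pair : Prop := (∀ (number : String) (index : Int) (max_pair : String), Dom_find_largest_pair number index max_pair → Raises_find_largest_pair number index max_pair → ¬ Pre_find_largest_pair number index max_pair) ∧ (Dom_find_largest_pair (pvRaiseWitness_find_largest_pair.1) (pvRaiseWitness_find_largest_pair.2.1) (pvRaiseWitness_find_largest_pair.2.2) ∧ Raises_find_largest_pair (pvRaiseWitness_find_largest_pair.1) (pvRaiseWitness_find_largest_pair.2.1) (pvRaiseWitness_find_largest_pair.2.2) ∧ find_largest_pair_alt (pvRaiseWitness_find_largest_pair.1) (pvRaiseWitness_find_largest_pair.2.1) (pvRaiseWitness_find_largest_pair.2.2) = pvRaiseWitnessOut_find_largest_pair)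

-- ===== LEMMAS AND PROOFS =====

-- all pairs [s[i], s[j]], i < j, grouped by first component — the pairs A's recursion scans
def pairsOf : List Char → List (List Char)
  | [] => []
  | c :: t => t.map (fun d => [c, d]) ++ pairsOf t

theorem pairsOf_short (s : List Char) (h : s.length ≤ 1) : pairsOf s = [] := by
  match s, h with
  | [], _ => rfl
  | [c], _ => rfl

theorem mem_pairsOf (s : List Char) (p : List Char) (h : p ∈ pairsOf s) :
    ∃ c d, p = [c, d] ∧ [c, d].Sublist s := by
  induction s with
  | nil => simp [pairsOf] at h
  | cons x t ih =>
    simp only [pairsOf, List.mem_append, List.mem_map] at h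
    rcases h with ⟨d, hd, rfl⟩ | h
    · exact ⟨x, d, rfl, List.Sublist.cons₂ x (List.singleton_sublist.mpr hd)⟩
    · obtain ⟨c, d, rfl, hs⟩ := ih h
      exact ⟨c, d, rfl, hs.cons x⟩

theorem sublist_mem_pairsOf (s : List Char) (c d : Char) (h : [c, d].Sublist s) :
    [c, d] ∈ pairsOf s := by
  induction s with
  | nil => simp at h
  | cons x t ih =>
    cases h with
    | cons _ h => exact List.mem_append_right _ (ih h)
    | cons₂ _ h =>
      exact List.mem_append_left _ (List.mem_map.mpr ⟨d, List.singleton_sublist.mp h, rfl⟩)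

theorem pairUpdate_eq_max (mp p : List Char) : (if mp < p then p else mp) = max mp p := by
  split_ifs with h
  · exact (max_eq_right h.le).symm
  · exact (max_eq_left (not_lt.mp h)).symm

-- A's recursion from index i is the running max of mp over pairsOf (chars.drop i)
theorem goA (chars : List Char) (k : Nat) :
    ∀ (i : Nat) (mp : List Char), chars.length - i ≤ k →
      find_largest_pair_go chars (i : Int) mp = (pairsOf (chars.drop i)).foldl max mp := by
  induction k with
  | zero =>
    intro i mp hk
    rw [find_largest_pair_go]
    have h1 : (PySem.List.len chars) - 1 ≤ (i : Int) := by
      simp only [PySem.List.len]; omega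
    rw [if_pos h1, pairsOf_short _ (by simp; omega), List.foldl_nil]
  | succ k ih =>
    intro i mp hk
    rw [find_largest_pair_go]
    by_cases h1 : (PySem.List.len chars) - 1 ≤ (i : Int)
    · rw [if_pos h1]
      have : chars.length ≤ i + 1 := by simp only [PySem.List.len] at h1; omega
      rw [pairsOf_short _ (by simp; omega), List.foldl_nil]
    · rw [if_neg h1]
      have hlt : i + 1 < chars.length := by simp only [PySem.List.len] at h1; omega
      have hi : i < chars.length := by omega
      -- the inner loop
      have hloop := PySem.List.foldl_pyRange_pyGetD chars ' '
        (fun acc c => if acc < [PySem.List.pyGetD chars (i : Int) ' ', c]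
                      then [PySem.List.pyGetD chars (i : Int) ' ', c] else acc)
        mp (a := (i : Int) + 1) (by omega)
      have htn : ((i : Int) + 1).toNat = i + 1 := by omega
      rw [htn] at hloop
      rw [hloop]
      have hget : PySem.List.pyGetD chars (i : Int) ' ' = chars[i] := by
        rw [PySem.List.pyGetD_eq_getElem chars ' ' (by omega) (by exact_mod_cast hi)]
        simp
      rw [hget]
      have hrec := ih (i + 1) (List.foldl (fun acc c => if acc < [chars[i], c] then [chars[i], c] else acc) mp (List.drop (i + 1) chars)) (by omega)
      have hcast : ((i : Int) + 1) = ((i + 1 : Nat) : Int) := by omega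
      rw [hcast, hrec]
      have hmap : List.foldl (fun acc c => if acc < [chars[i], c] then [chars[i], c] else acc) mp (List.drop (i + 1) chars)
          = List.foldl max mp (List.map (fun d => [chars[i], d]) (List.drop (i + 1) chars)) := by
        rw [List.foldl_map]
        congr 1
        funext acc c
        exact pairUpdate_eq_max acc [chars[i], c]
      rw [hmap, List.drop_eq_getElem_cons hi]
      simp only [pairsOf, List.foldl_append]

-- B invariants ------------------------------------------------------------

theorem flpStep_fst (st : List Char × List Char) (c : Char) :
    (flpStep st c).1 = if st.2 ≠ [] then max st.1 (st.2 ++ [c]) else st.1 := by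
  simp only [flpStep]
  by_cases h : st.2 = [] <;> simp [h, pairUpdate_eq_max]

theorem flpStep_snd (st : List Char × List Char) (c : Char) :
    (flpStep st c).2 = if st.2 < [c] then [c] else st.2 := rfl

-- best only grows along the fold
theorem flp_mono (t : List Char) : ∀ st : List Char × List Char,
    st.1 ≤ (t.foldl flpStep st).1 := by
  induction t with
  | nil => intro st; exact le_refl _
  | cons x t ih =>
    intro st
    refine le_trans ?_ (ih (flpStep st x))
    rw [flpStep_fst]
    split_ifs with h
    · exact le_max_left _ _
    · exact le_refl _

-- once `first` dominates a, every later pair [a, d] is dominated by the final best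
theorem flp_dom2 (t : List Char) : ∀ (st : List Char × List Char) (a b d : Char),
    d ∈ t → st.2 = [b] → a ≤ b → [a, d] ≤ (t.foldl flpStep st).1 := by
  induction t with
  | nil => intro st a b d hd; simp at hd
  | cons x t ih =>
    intro st a b d hd hst hab
    simp only [List.foldl_cons]
    rcases List.mem_cons.mp hd with heq | hd
    · -- the pair [a, x] is at most max best (first ++ [x]), which only grows
      subst heq
      refine le_trans ?_ (flp_mono t (flpStep st d))
      rw [flpStep_fst, hst]
      have h2 : [a, d] ≤ [b, d] := by
        rcases lt_or_eq_of_le hab with h | rfl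
        · exact le_of_lt (List.cons_lt_cons_iff.mpr (Or.inl h))
        · exact le_refl _
      simp only [ne_eq, reduceCtorEq, not_false_iff, if_true]
      exact le_trans h2 (le_max_right _ _)
    · -- new first is max b x ≥ a
      have hsnd : (flpStep st x).2 = if [b] < [x] then [x] else [b] := by
        rw [flpStep_snd, hst]
      by_cases hbx : [b] < [x]
      · refine ih (flpStep st x) a x d hd (by rw [hsnd, if_pos hbx]) ?_
        have hx : b < x := by
          rcases List.cons_lt_cons_iff.mp hbx with h | ⟨_, h⟩
          · exact h
          · simp at h
        exact le_of_lt (lt_of_le_of_lt hab hx)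
      · exact ih (flpStep st x) a b d hd (by rw [hsnd, if_neg hbx]) hab

-- every pair of the scanned suffix is dominated by the final best
theorem flp_dom (t : List Char) : ∀ (st : List Char × List Char) (c d : Char),
    [c, d].Sublist t → (st.2 = [] ∨ ∃ b, st.2 = [b]) → [c, d] ≤ (t.foldl flpStep st).1 := by
  induction t with
  | nil => intro st c d h; simp at h
  | cons x t ih =>
    intro st c d h hsnd
    simp only [List.foldl_cons]
    cases h with
    | cons _ h =>
      refine ih (flpStep st x) c d h ?_
      rw [flpStep_snd]
      rcases hsnd with h0 | ⟨b, hb⟩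
      · rw [h0]; split_ifs <;> simp
      · rw [hb]; split_ifs <;> exact Or.inr ⟨_, rfl⟩
    | cons₂ _ h =>
      -- c = x is seen now; afterwards first ≥ [x]
      have hd : d ∈ t := (List.singleton_sublist.mp h)
      rcases hsnd with h0 | ⟨b, hb⟩
      · refine flp_dom2 t (flpStep st x) x x d hd ?_ (le_refl x)
        rw [flpStep_snd, h0, if_pos (by simp)]
      · by_cases hbx : [b] < [x]
        · refine flp_dom2 t (flpStep st x) x x d hd ?_ (le_refl x)
          rw [flpStep_snd, hb, if_pos hbx]
        · refine flp_dom2 t (flpStep st x) x b d hd ?_ ?_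
          · rw [flpStep_snd, hb, if_neg hbx]
          · have hnb : ¬ (b < x) := fun hc => hbx (List.cons_lt_cons_iff.mpr (Or.inl hc))
            exact le_of_not_gt hnb

-- the final best is the initial best or some pair of (first-char ++ suffix)
theorem flp_shape (t : List Char) : ∀ (st : List Char × List Char),
    (st.2 = [] ∨ ∃ b, st.2 = [b]) →
    (t.foldl flpStep st).1 = st.1 ∨
      ∃ c d, (t.foldl flpStep st).1 = [c, d] ∧ [c, d].Sublist (st.2 ++ t) := by
  induction t with
  | nil => intro st _; exact Or.inl rfl
  | cons x t ih =>
    intro st hsnd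
    simp only [List.foldl_cons]
    have hsnd' : (flpStep st x).2 = [] ∨ ∃ b, (flpStep st x).2 = [b] := by
      rw [flpStep_snd]
      rcases hsnd with h0 | ⟨b, hb⟩
      · rw [h0]; split_ifs <;> simp
      · rw [hb]; split_ifs <;> exact Or.inr ⟨_, rfl⟩
    have hemb : ((flpStep st x).2 ++ t).Sublist (st.2 ++ (x :: t)) := by
      rw [flpStep_snd]
      split_ifs with hlt
      · exact List.sublist_append_right st.2 (x :: t)
      · exact (List.sublist_cons_self x t).append_left st.2
    rcases ih (flpStep st x) hsnd' with h1 | ⟨c, d, h1, h2⟩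
    · rw [h1, flpStep_fst]
      split_ifs with hne
      · rcases hsnd with h0 | ⟨b, hb⟩
        · exact absurd h0 hne
        · rcases max_choice st.1 (st.2 ++ [x]) with hm | hm
          · exact Or.inl hm
          · refine Or.inr ⟨b, x, by rw [hm, hb]; rfl, ?_⟩
            rw [hb]
            exact List.Sublist.cons₂ b (List.Sublist.cons₂ x (List.nil_sublist t))
      · exact Or.inl rfl
    · exact Or.inr ⟨c, d, h1, h2.trans hemb⟩

-- list-level equivalence: A's pair fold = B's single pass
theorem flp_main (s mp : List Char) :
    (pairsOf s).foldl max mp = (s.foldl flpStep (mp, ([] : List Char))).1 := by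
  apply le_antisymm
  · rcases PySem.List.foldl_max_mem (pairsOf s) mp with h | h
    · rw [h]; exact flp_mono s (mp, [])
    · obtain ⟨c, d, hp, hs⟩ := mem_pairsOf s _ h
      rw [hp]
      exact flp_dom s (mp, []) c d hs (Or.inl rfl)
  · rcases flp_shape s (mp, []) (Or.inl rfl) with h | ⟨c, d, h1, h2⟩
    · rw [h]; exact (PySem.List.le_foldl_max (pairsOf s) mp).1
    · rw [h1]
      exact (PySem.List.le_foldl_max (pairsOf s) mp).2 _
        (sublist_mem_pairsOf s c d (by simpa using h2))

-- ===== VERDICT (by name: the statement is the Claim_ definition above) =====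
theorem find_largest_pair_spec : Claim_equal_find_largest_pair := by
  intro number index max_pair _hDom hPre
  unfold Spec_find_largest_pair find_largest_pair find_largest_pair_alt
  rw [PySem.List.slice_from number.toList hPre]
  have hP : (0 : Int) ≤ index := hPre
  have hidx : index = ((index.toNat : Nat) : Int) := (Int.toNat_of_nonneg hP).symm
  rw [hidx, goA number.toList (number.toList.length) index.toNat max_pair.toList (by omega),
    flp_main, Int.toNat_natCast]

@[simp] theorem find_largest_pair_raises : Claim_raises_find_largest_pair := by
  unfold Claim_raises_find_largest_pair
  constructor
  · intro number index max_pair _hDom hR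
    unfold Raises_find_largest_pair at hR
    unfold Pre_find_largest_pair
    rw [PySem.Str.len_eq] at hR
    omega
  · exact ⟨by decide, by decide, by decide⟩
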